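-- pv_equiv track=rewrite | github.com/IIllIlllIl/vibe-coding-experiment | scripts/run-experiment.py | filter_diff_excluding_paths
-- ===== SOURCE A (Python) =====
-- def _normalize_path(p: str) -> str:
--     """Normalize a diff path: strip a/ b/ prefix and remove leading ./ """
--     if p.startswith("a/") or p.startswith("b/"):
--         p = p[2:]
--     if p.startswith("./"):
--         p = p[2:]
--     return p
--
-- def filter_diff_excluding_paths(patch_content: str, exclude_paths: set) -> str:
--     """Filter a unified diff, removing hunks for files in exclude_paths.
--
--     Uses the same rfind strategy as parse_diff_file_paths to handle
--     paths with spaces correctly.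
--     """
--     filtered_lines: list[str] = []
--     skip = False
--     for line in patch_content.splitlines():
--         if line.startswith("diff --git "):
--             rest = line[len("diff --git "):]
--             b_idx = rest.rfind(" b/")
--             path = _normalize_path(rest[b_idx + 1:]) if b_idx >= 0 else ""
--             skip = path in exclude_paths
--         if not skip:
--             filtered_lines.append(line)
--     return "\n".join(filtered_lines) + "\n"
-- ===== SOURCE B (Python) =====
-- def _normalize_path(p: str) -> str:
--     if p.startswith("a/") or p.startswith("b/"):
--         p = p[2:]
--     if p.startswith("./"):
--         p = p[2:]
--     return p
--
-- def filter_diff_excluding_paths(patch_content: str, exclude_paths: set) -> str: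
--     """Group the diff into a preamble chunk plus one chunk per 'diff --git '
--     header, drop whole chunks whose header path is excluded, and flatten."""
--     chunks = [[]]
--     for line in patch_content.splitlines():
--         if line.startswith("diff --git "):
--             chunks.append([line])
--         else:
--             chunks[-1].append(line)
--     kept = []
--     for chunk in chunks:
--         if chunk and chunk[0].startswith("diff --git "):
--             rest = chunk[0][len("diff --git "):]
--             b_idx = rest.rfind(" b/")
--             path = _normalize_path(rest[b_idx + 1:]) if b_idx >= 0 else ""
--             if path in exclude_paths:
--                 continue
--         kept.extend(chunk)
--     return "\n".join(kept) + "\n"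
-- ===== Notes on version B (the rewrite author's own statement) =====
-- stated objective: alternative
-- what changed: Replaces A's line-by-line loop threading a skip flag with a grouping pass that splits the diff into a preamble chunk plus one chunk per 'diff --git ' header, filters whole chunks by their header path, and flattens.
import Mathlib
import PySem

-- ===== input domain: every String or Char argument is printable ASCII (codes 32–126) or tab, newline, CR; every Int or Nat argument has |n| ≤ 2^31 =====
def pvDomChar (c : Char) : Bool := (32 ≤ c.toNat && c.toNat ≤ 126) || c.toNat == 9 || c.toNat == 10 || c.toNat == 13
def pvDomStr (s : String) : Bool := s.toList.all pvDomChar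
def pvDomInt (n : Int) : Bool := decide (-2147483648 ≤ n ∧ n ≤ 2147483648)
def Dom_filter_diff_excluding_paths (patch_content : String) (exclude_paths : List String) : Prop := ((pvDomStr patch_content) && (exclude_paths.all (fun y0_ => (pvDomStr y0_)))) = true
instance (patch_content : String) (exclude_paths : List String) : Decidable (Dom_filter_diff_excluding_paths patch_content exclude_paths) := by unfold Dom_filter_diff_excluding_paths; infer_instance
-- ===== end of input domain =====

-- B regroups the diff into header-delimited chunks and filters whole chunks instead
-- of threading a skip flag through a line loop (objective: alternative decomposition, same cost).

-- ===== PORT A =====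
-- _normalize_path, identical helper in both Python versions
def normalizePath (p : String) : String :=
  let p := if PySem.Str.startswith p "a/" || PySem.Str.startswith p "b/"
           then PySem.Str.slice p (some 2) none else p
  if PySem.Str.startswith p "./" then PySem.Str.slice p (some 2) none else p

-- the path-extraction-and-membership steps both Pythons perform on a 'diff --git ' line
def headerExcluded (line : String) (exclude_paths : List String) : Bool :=
  let rest := PySem.Str.slice line (some 11) none     -- line[len("diff --git "):]
  let bIdx := PySem.Str.rfind rest " b/"
  let path := if bIdx ≥ 0 then normalizePath (PySem.Str.slice rest (some (bIdx + 1)) none)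
              else ""
  exclude_paths.contains path

-- A's for-loop with the skip flag, as structural recursion over the lines
def aLoop (exclude_paths : List String) (skip : Bool) : List String → List String
  | [] => []
  | l :: ls =>
    let skip' := if PySem.Str.startswith l "diff --git " then headerExcluded l exclude_paths
                 else skip
    if skip' then aLoop exclude_paths skip' ls else l :: aLoop exclude_paths skip' ls

def filter_diff_excluding_paths (patch_content : String) (exclude_paths : List String) : String :=
  PySem.Str.join "\n" (aLoop exclude_paths false (PySem.Str.splitlines patch_content)) ++ "\n"

-- ===== PORT B =====
-- chunks.append([line]) / chunks[-1].append(line), one loop step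
def addLine (chunks : List (List String)) (l : String) : List (List String) :=
  if PySem.Str.startswith l "diff --git " then chunks ++ [[l]]
  else chunks.dropLast ++ [(chunks.getLast?.getD []) ++ [l]]

-- the 'if chunk and chunk[0].startswith … continue' test of B's second loop
def keepChunk (exclude_paths : List String) (c : List String) : Bool :=
  match c with
  | [] => true
  | h :: _ => if PySem.Str.startswith h "diff --git " then !headerExcluded h exclude_paths
              else true

def filter_diff_excluding_paths_alt (patch_content : String) (exclude_paths : List String) : String :=
  let chunks := (PySem.Str.splitlines patch_content).foldl addLine [[]]
  let kept := chunks.foldl (fun acc c => if keepChunk exclude_paths c then acc ++ c else acc) []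
  PySem.Str.join "\n" kept ++ "\n"

-- ===== PRECONDITION & SPEC =====
def Spec_filter_diff_excluding_paths (patch_content : String) (exclude_paths : List String) (out : String) : Prop := out = filter_diff_excluding_paths_alt patch_content exclude_paths
instance (patch_content : String) (exclude_paths : List String) (out : String) : Decidable (Spec_filter_diff_excluding_paths patch_content exclude_paths out) := by unfold Spec_filter_diff_excluding_paths; infer_instance

-- ===== CLAIM (what is proved, stated in full; the proofs are below) =====
def Claim_equal_filter_diff_excluding_paths : Prop := ∀ (patch_content : String) (exclude_paths : List String), Dom_filter_diff_excluding_paths patch_content exclude_paths → Spec_filter_diff_excluding_paths patch_content exclude_paths (filter_diff_excluding_paths patch_content exclude_paths)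

-- ===== LEMMAS AND PROOFS =====

-- proof-side view of B's first loop: the chunk list it builds, with c the open chunk
def bGo (c : List String) : List String → List (List String)
  | [] => [c]
  | l :: ls =>
    if PySem.Str.startswith l "diff --git " then c :: bGo [l] ls else bGo (c ++ [l]) ls

theorem foldl_addLine_eq_bGo (ls : List String) :
    ∀ (cs : List (List String)) (c : List String),
      ls.foldl addLine (cs ++ [c]) = cs ++ bGo c ls := by
  induction ls with
  | nil => intro cs c; simp [bGo]
  | cons l ls ih =>
    intro cs c
    simp only [List.foldl_cons, addLine, bGo]
    cases hsw : PySem.Str.startswith l "diff --git " with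
    | true =>
      simp only [if_true]
      have := ih (cs ++ [c]) [l]
      rw [List.append_assoc] at this
      simpa using this
    | false =>
      simp only [Bool.false_eq_true, if_false]
      have hd : (cs ++ [c]).dropLast = cs := by simp
      have hl : (cs ++ [c]).getLast?.getD [] = c := by simp
      rw [hd, hl, ih cs (c ++ [l])]

theorem keepChunk_append_nonheader (ex : List String) (c : List String) (l : String)
    (h : PySem.Str.startswith l "diff --git " = false) :
    keepChunk ex (c ++ [l]) = keepChunk ex c := by
  cases c with
  | nil => simp only [List.nil_append, keepChunk, h, Bool.false_eq_true, if_false]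
  | cons x xs => simp [keepChunk]

theorem bGo_filter_flatten (ex : List String) (ls : List String) :
    ∀ (c : List String),
      ((bGo c ls).filter (keepChunk ex)).flatten
        = (if keepChunk ex c then c else []) ++ aLoop ex (!keepChunk ex c) ls := by
  induction ls with
  | nil =>
    intro c
    cases hc : keepChunk ex c <;> simp [bGo, aLoop, List.filter, hc]
  | cons l ls ih =>
    intro c
    simp only [bGo, aLoop]
    cases hsw : PySem.Str.startswith l "diff --git " with
    | true =>
      simp only [if_true]
      have hk : keepChunk ex [l] = !headerExcluded l ex := by
        simp only [keepChunk, hsw, if_true]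
      rw [List.filter_cons]
      cases hc : keepChunk ex c with
      | true =>
        simp only [if_true, List.flatten_cons, ih [l], hk]
        cases he : headerExcluded l ex <;> simp
      | false =>
        simp only [Bool.false_eq_true, if_false]
        rw [ih [l], hk]
        cases he : headerExcluded l ex <;> simp
    | false =>
      simp only [Bool.false_eq_true, if_false]
      have heq := keepChunk_append_nonheader ex c l hsw
      rw [ih (c ++ [l]), heq]
      cases hc : keepChunk ex c <;> simp

theorem kept_eq (ex : List String) (ls : List String) :
    ((List.foldl addLine [[]] ls).filter (keepChunk ex)).flatten = aLoop ex false ls := by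
  have h0 := foldl_addLine_eq_bGo ls [] []
  rw [List.nil_append] at h0
  rw [h0, List.nil_append]
  have := bGo_filter_flatten ex ls []
  simpa [keepChunk] using this

-- ===== VERDICT (by name: the statement is the Claim_ definition above) =====
theorem filter_diff_excluding_paths_spec : Claim_equal_filter_diff_excluding_paths := by
  intro pc ex _
  unfold Spec_filter_diff_excluding_paths filter_diff_excluding_paths
  simp only [filter_diff_excluding_paths_alt]
  rw [PySem.List.foldl_ite_eq_foldl_filter, PySem.List.foldl_append_eq_flatten,
    List.nil_append]
  simp only [Bool.decide_eq_true]
  rw [kept_eq]
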